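-- pv_equiv track=rewrite | github.com/advaitpaliwal/BE1600 | Labs/Lab5.py | vowel_replace
-- ===== SOURCE A (Python) =====
-- def vowel_replace(input):
--     input = input.upper()
--     vowels = "AEIOU"
--     j = 0
--     for i in input:
--         if i in vowels:
--             input = input.replace(i, "*")
--             j += 1
--     return input, j
-- ===== SOURCE B (Python) =====
-- _TABLE = str.maketrans({v: "*" for v in "AEIOU"})
--
-- def vowel_replace(input):
--     up = input.upper()
--     return up.translate(_TABLE), sum(up.count(v) for v in "AEIOU")
-- ===== Notes on version B (the rewrite author's own statement) =====
-- stated objective: faster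
-- what changed: A rescans and rebuilds the whole string with str.replace once per vowel occurrence (quadratic); B builds the result in one str.translate pass and gets the count from five str.count calls.
import Mathlib
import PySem

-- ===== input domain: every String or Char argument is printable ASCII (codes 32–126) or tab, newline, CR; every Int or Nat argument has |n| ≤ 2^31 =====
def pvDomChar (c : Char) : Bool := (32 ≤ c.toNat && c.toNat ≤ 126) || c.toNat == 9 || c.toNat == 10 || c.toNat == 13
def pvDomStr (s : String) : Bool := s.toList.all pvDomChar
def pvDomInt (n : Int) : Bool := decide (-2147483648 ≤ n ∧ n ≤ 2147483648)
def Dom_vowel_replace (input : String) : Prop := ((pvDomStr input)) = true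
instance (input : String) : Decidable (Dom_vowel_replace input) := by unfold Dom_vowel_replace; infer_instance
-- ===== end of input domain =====

-- B replaces A's per-vowel-occurrence whole-string str.replace rescans with one str.translate pass plus five str.count calls; return value only (A only rebinds a local, no visible mutation).

-- ===== PORT A =====
-- for i in input: iterates the string bound BEFORE the loop body rebinds `input`,
-- i.e. the uppercased original; each vowel hit replaces ALL its occurrences and bumps j.
def vowel_replace (input : String) : String × Int :=
  let input := PySem.Str.upper input
  let vowels : String := "AEIOU"
  let st := input.toList.foldl
    (fun (st : String × Int) (i : Char) =>
      if PySem.Str.isIn (String.ofList [i]) vowels then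
        (PySem.Str.replace st.1 (String.ofList [i]) "*", st.2 + 1)
      else st)
    (input, (0 : Int))
  st

-- ===== PORT B =====
-- up.translate(_TABLE): per-character mapping sending each of A,E,I,O,U to '*'
def vowel_replace_alt (input : String) : String × Int :=
  let up := PySem.Str.upper input
  (String.ofList (up.toList.map (fun c =>
      if c = 'A' ∨ c = 'E' ∨ c = 'I' ∨ c = 'O' ∨ c = 'U' then '*' else c)),
   ("AEIOU".toList.map (fun v => (PySem.Str.count up (String.ofList [v]) : Int))).sum)

-- ===== PRECONDITION & SPEC =====
def Spec_vowel_replace (input : String) (out : String × Int) : Prop := out = vowel_replace_alt input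
instance (input : String) (out : String × Int) : Decidable (Spec_vowel_replace input out) := by unfold Spec_vowel_replace; infer_instance

-- ===== CLAIM (what is proved, stated in full; the proofs are below) =====
def Claim_equal_vowel_replace : Prop := ∀ (input : String), Dom_vowel_replace input → Spec_vowel_replace input (vowel_replace input)

-- ===== LEMMAS AND PROOFS =====

def vchars : List Char := ['A', 'E', 'I', 'O', 'U']

-- `c in vowels` for a single character is list membership
theorem isIn_singleton (c : Char) (l : List Char) :
    PySem.Chars.isIn [c] l = l.contains c := by
  by_cases h : c ∈ l
  · have hin : [c] <:+: l := by
      obtain ⟨s, t, rfl⟩ := List.append_of_mem h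
      exact ⟨s, t, by simp⟩
    simp [(PySem.Chars.isIn_iff_infix _ _).2 hin, h]
  · have hnin : ¬ ([c] <:+: l) := fun hin => h (hin.subset (List.mem_singleton_self c))
    simp [(PySem.Chars.isIn_eq_false_iff _ _).2 hnin, h]

theorem isIn_vowel (c : Char) :
    PySem.Chars.isIn [c] "AEIOU".toList = vchars.contains c := by
  rw [show "AEIOU".toList = vchars by decide]
  exact isIn_singleton c vchars

theorem strIsIn_vowel (c : Char) :
    PySem.Str.isIn (String.ofList [c]) "AEIOU" = vchars.contains c := by
  show PySem.Chars.isIn (String.ofList [c]).toList "AEIOU".toList = _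
  rw [String.toList_ofList]
  exact isIn_vowel c

-- str.replace with a single-character pattern is a pointwise map
theorem replace_go_single (c r : Char) :
    ∀ (fuel : Nat) (l acc : List Char), l.length ≤ fuel →
      PySem.Chars.replace.go [c] [r] fuel l acc
        = acc.reverse ++ l.map (fun x => if x = c then r else x) := by
  intro fuel
  induction fuel with
  | zero =>
    intro l acc h
    have : l = [] := List.eq_nil_of_length_eq_zero (Nat.le_zero.1 h)
    subst this; simp [PySem.Chars.replace.go]
  | succ n ih =>
    intro l acc h
    cases l with
    | nil => simp [PySem.Chars.replace.go]
    | cons c' t =>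
      simp only [List.length_cons, Nat.add_le_add_iff_right] at h
      by_cases hc : c = c'
      · subst hc
        have hpre : List.isPrefixOf [c] (c :: t) = true := by simp [List.isPrefixOf]
        simp only [PySem.Chars.replace.go, hpre, if_true]
        rw [show List.drop [c].length (c :: t) = t from rfl,
            show [r].reverse ++ acc = r :: acc from rfl, ih t _ h]
        simp
      · have hpre : List.isPrefixOf [c] (c' :: t) = false := by
          simp [List.isPrefixOf, hc]
        simp only [PySem.Chars.replace.go, hpre, Bool.false_eq_true, if_false]
        rw [ih t _ h]
        simp [Ne.symm hc]

theorem replace_single (c r : Char) (l : List Char) :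
    PySem.Chars.replace l [c] [r] = l.map (fun x => if x = c then r else x) := by
  simp only [PySem.Chars.replace, List.isEmpty_cons, Bool.false_eq_true, if_false]
  simpa using replace_go_single c r l.length l [] (le_refl _)

-- A's fold, seen on character lists: each processed vowel replaces all its occurrences
theorem foldA (todo : List Char) :
    ∀ (s : List Char) (j : Int),
      todo.foldl
        (fun (st : List Char × Int) (i : Char) =>
          if vchars.contains i then
            (st.1.map (fun x => if x = i then '*' else x), st.2 + 1)
          else st)
        (s, j)
      = (s.map (fun x => if vchars.contains x ∧ x ∈ todo then '*' else x),
         j + (todo.countP (fun x => vchars.contains x) : Int)) := by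
  induction todo with
  | nil => intro s j; simp
  | cons c t ih =>
    intro s j
    by_cases hv : vchars.contains c = true
    · simp only [List.foldl_cons, hv, if_true, ih, List.map_map, List.countP_cons]
      refine Prod.ext ?_ ?_
      · simp only
        apply List.map_congr_left
        intro x _
        have hv' : c ∈ vchars := by simpa using hv
        by_cases hxc : x = c
        · subst hxc
          simp [Function.comp, show ('*' ∈ vchars) = False by decide, hv']
        · simp only [Function.comp, if_neg hxc, List.mem_cons]
          by_cases hvx : x ∈ vchars <;> simp [hvx, hxc]
      · simp only
        push_cast; ring
    · simp only [List.foldl_cons, Bool.false_eq_true, if_false, ih, List.countP_cons, hv]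
      refine Prod.ext ?_ ?_
      · simp only
        apply List.map_congr_left
        intro x _
        have hv' : c ∉ vchars := by simpa using hv
        by_cases hxc : x = c
        · subst hxc; simp [hv']
        · simp [List.mem_cons, hxc]
      · simp

-- s.count(v) for a single-character needle is List.count
theorem count_go_single (c : Char) :
    ∀ (fuel : Nat) (l : List Char) (acc : Nat), l.length ≤ fuel →
      PySem.Chars.count.go [c] fuel l acc = acc + l.count c := by
  intro fuel
  induction fuel with
  | zero =>
    intro l acc h
    have : l = [] := List.eq_nil_of_length_eq_zero (Nat.le_zero.1 h)
    subst this; simp [PySem.Chars.count.go]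
  | succ n ih =>
    intro l acc h
    cases l with
    | nil => simp [PySem.Chars.count.go]
    | cons c' t =>
      simp only [List.length_cons, Nat.add_le_add_iff_right] at h
      by_cases hc : c = c'
      · subst hc
        have hpre : List.isPrefixOf [c] (c :: t) = true := by simp [List.isPrefixOf]
        simp only [PySem.Chars.count.go, hpre, if_true]
        rw [show List.drop [c].length (c :: t) = t from rfl, ih t _ h]
        simp
        omega
      · have hpre : List.isPrefixOf [c] (c' :: t) = false := by
          simp [List.isPrefixOf, hc]
        simp only [PySem.Chars.count.go, hpre, Bool.false_eq_true, if_false]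
        rw [ih t _ h]
        simp [Ne.symm hc]

theorem count_single (l : List Char) (c : Char) :
    PySem.Chars.count l [c] = l.count c := by
  simp only [PySem.Chars.count, List.isEmpty_cons, Bool.false_eq_true, if_false]
  simpa using count_go_single c l.length l 0 (le_refl _)

-- a vowel-membership count is the sum of the five per-vowel counts
theorem countP_mem_eq (t : List Char) :
    (t.countP (fun x => vchars.contains x) : Int)
      = (t.count 'A' : Int) + t.count 'E' + t.count 'I' + t.count 'O' + t.count 'U' := by
  induction t with
  | nil => simp
  | cons c t ih =>
    simp only [List.countP_cons, List.count_cons]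
    by_cases h1 : c = 'A'
    · subst h1; push_cast [ih]; simp [vchars]; omega
    by_cases h2 : c = 'E'
    · subst h2; push_cast [ih]; simp [vchars]; omega
    by_cases h3 : c = 'I'
    · subst h3; push_cast [ih]; simp [vchars]; omega
    by_cases h4 : c = 'O'
    · subst h4; push_cast [ih]; simp [vchars]; omega
    by_cases h5 : c = 'U'
    · subst h5; push_cast [ih]; simp [vchars]; omega
    push_cast [ih]
    simp [vchars, beq_iff_eq, h1, h2, h3, h4, h5]

-- A's String-level fold tracked through toList
theorem foldA_str (todo : List Char) :
    ∀ (s : String) (j : Int),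
      todo.foldl
        (fun (st : String × Int) (i : Char) =>
          if PySem.Str.isIn (String.ofList [i]) "AEIOU" then
            (PySem.Str.replace st.1 (String.ofList [i]) "*", st.2 + 1)
          else st)
        (s, j)
      = (String.ofList (todo.foldl
          (fun (st : List Char × Int) (i : Char) =>
            if vchars.contains i then
              (st.1.map (fun x => if x = i then '*' else x), st.2 + 1)
            else st)
          (s.toList, j)).1,
         (todo.foldl
          (fun (st : List Char × Int) (i : Char) =>
            if vchars.contains i then
              (st.1.map (fun x => if x = i then '*' else x), st.2 + 1)
            else st)
          (s.toList, j)).2) := by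
  induction todo with
  | nil => intro s j; simp
  | cons c t ih =>
    intro s j
    by_cases hv : vchars.contains c = true
    · have hrep : (PySem.Str.replace s (String.ofList [c]) "*").toList
          = List.map (fun x => if x = c then '*' else x) s.toList := by
        rw [show PySem.Str.replace s (String.ofList [c]) "*"
              = String.ofList (PySem.Chars.replace s.toList (String.ofList [c]).toList "*".toList) from rfl,
            String.toList_ofList, String.toList_ofList, show "*".toList = ['*'] by decide]
        exact replace_single c '*' s.toList
      rw [List.foldl_cons, strIsIn_vowel, if_pos hv, ih _ (j + 1), hrep]
      simp only [List.foldl_cons, hv, if_true]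
    · rw [List.foldl_cons, strIsIn_vowel, if_neg hv]
      simp only [List.foldl_cons, hv, Bool.false_eq_true, if_false]
      exact ih s j

-- ===== VERDICT (by name: the statement is the Claim_ definition above) =====
theorem vowel_replace_spec : Claim_equal_vowel_replace := by
  intro input _
  unfold Spec_vowel_replace vowel_replace vowel_replace_alt
  simp only [foldA_str, foldA]
  refine Prod.ext ?_ ?_
  · simp only
    congr 1
    apply List.map_congr_left
    intro x hx
    have hx' : x ∈ PySem.Chars.upper input.toList := by simpa using hx
    by_cases hvx : x ∈ vchars
    · have : x = 'A' ∨ x = 'E' ∨ x = 'I' ∨ x = 'O' ∨ x = 'U' := by simpa [vchars] using hvx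
      simp [hvx, hx', this]
    · have : ¬(x = 'A' ∨ x = 'E' ∨ x = 'I' ∨ x = 'O' ∨ x = 'U') := by simpa [vchars] using hvx
      simp [hvx, this]
  · show (0 : Int) + _ = _
    have hc : ∀ v : Char,
        PySem.Str.count (PySem.Str.upper input) (String.ofList [v])
          = (PySem.Str.upper input).toList.count v := by
      intro v
      show PySem.Chars.count (PySem.Str.upper input).toList (String.ofList [v]).toList = _
      rw [String.toList_ofList]
      exact count_single _ v
    rw [countP_mem_eq]
    simp only [show "AEIOU".toList = vchars by decide, vchars, List.map_cons, List.map_nil,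
      List.sum_cons, List.sum_nil, hc]
    ring
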